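-- pv_equiv track=rewrite | github.com/drusmanbashir/utilz | utilz/random_word_maker.py | suffix_from_index
-- ===== SOURCE A (Python) =====
-- import string
--
-- VOWELS = "aeiou"
--
-- CONSONANTS = "".join(ch for ch in string.ascii_lowercase if ch not in VOWELS)
--
-- def suffix_from_index(pattern: str, index: int, with_digit: bool = False) -> str:
--     if with_digit:
--         digit = str(index % 10)
--         index //= 10
--     else:
--         digit = ""
--
--     chars = []
--     for symbol in reversed(pattern):
--         alphabet = CONSONANTS if symbol == "C" else VOWELS
--         index, remainder = divmod(index, len(alphabet))
--         chars.append(alphabet[remainder])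
--     return "".join(reversed(chars)) + digit
-- ===== SOURCE B (Python) =====
-- import string
--
-- VOWELS = "aeiou"
--
-- CONSONANTS = "".join(ch for ch in string.ascii_lowercase if ch not in VOWELS)
--
--
-- def suffix_from_index(pattern: str, index: int, with_digit: bool = False) -> str:
--     if with_digit:
--         digit = str(index % 10)
--         index //= 10
--     else:
--         digit = ""
--
--     alphabets = [CONSONANTS if symbol == "C" else VOWELS for symbol in pattern]
--     # positional weights: suffix products of the radices
--     weights = []
--     w = 1
--     for a in reversed(alphabets):
--         weights.append(w)
--         w *= len(a)
--     weights.reverse()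
--     return "".join(
--         a[(index // w) % len(a)] for a, w in zip(alphabets, weights)
--     ) + digit
-- ===== Notes on version B (the rewrite author's own statement) =====
-- stated objective: alternative
-- what changed: Replaces A's right-to-left peel loop (repeated divmod with reversal of the collected chars) by precomputing the suffix-product positional weights and emitting each character left-to-right directly as alphabet[(index // weight) % radix], with no final reversal.
import Mathlib
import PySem

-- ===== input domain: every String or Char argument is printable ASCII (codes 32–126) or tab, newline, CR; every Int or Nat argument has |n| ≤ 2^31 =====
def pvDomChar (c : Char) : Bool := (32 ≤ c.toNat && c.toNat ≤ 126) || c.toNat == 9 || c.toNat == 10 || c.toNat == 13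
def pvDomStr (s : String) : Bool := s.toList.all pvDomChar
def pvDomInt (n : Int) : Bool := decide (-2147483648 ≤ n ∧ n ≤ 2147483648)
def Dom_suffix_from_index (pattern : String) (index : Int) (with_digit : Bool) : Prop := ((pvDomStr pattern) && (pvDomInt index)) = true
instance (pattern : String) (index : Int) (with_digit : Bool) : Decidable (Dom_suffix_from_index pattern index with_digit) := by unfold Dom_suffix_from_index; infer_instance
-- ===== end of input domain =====

-- B replaces A's peel-digits-right-to-left-and-reverse loop by a forward pass over
-- precomputed positional weights (suffix products of the radices); objective: alternative decomposition.

-- ===== PORT A =====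
def pvConsonants : List Char := "bcdfghjklmnpqrstvwxyz".toList
def pvVowels : List Char := "aeiou".toList

def suffix_from_index (pattern : String) (index : Int) (with_digit : Bool) : String :=
  let digit : String := if with_digit then PySem.Int.toStr (PySem.Int.mod index 10) else ""
  let index0 : Int := if with_digit then PySem.Int.floordiv index 10 else index
  let res := pattern.toList.reverse.foldl
    (fun (st : Int × List Char) symbol =>
      let alphabet := if symbol == 'C' then pvConsonants else pvVowels
      let q := PySem.Int.floordiv st.1 (alphabet.length : Int)
      let r := PySem.Int.mod st.1 (alphabet.length : Int)
      -- alphabet[r]: exact, 0 ≤ r < len alphabet since the divisor is positive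
      (q, st.2 ++ [(PySem.List.pyGet? alphabet r).getD ' ']))
    (index0, [])
  String.ofList res.2.reverse ++ digit

-- ===== PORT B =====
def pvAlphOf (c : Char) : List Char := if c == 'C' then pvConsonants else pvVowels

def suffix_from_index_alt (pattern : String) (index : Int) (with_digit : Bool) : String :=
  let digit : String := if with_digit then PySem.Int.toStr (PySem.Int.mod index 10) else ""
  let index0 : Int := if with_digit then PySem.Int.floordiv index 10 else index
  let alphabets := pattern.toList.map pvAlphOf
  let wrev := alphabets.reverse.foldl
    (fun (st : List Int × Int) a => (st.1 ++ [st.2], st.2 * (a.length : Int))) ([], 1)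
  let weights := wrev.1.reverse
  String.ofList ((alphabets.zip weights).map
    (fun aw => (PySem.List.pyGet? aw.1
      (PySem.Int.mod (PySem.Int.floordiv index0 aw.2) (aw.1.length : Int))).getD ' ')) ++ digit

-- ===== PRECONDITION & SPEC =====
def Spec_suffix_from_index (pattern : String) (index : Int) (with_digit : Bool) (out : String) : Prop := out = suffix_from_index_alt pattern index with_digit
instance (pattern : String) (index : Int) (with_digit : Bool) (out : String) : Decidable (Spec_suffix_from_index pattern index with_digit out) := by unfold Spec_suffix_from_index; infer_instance

-- ===== CLAIM (what is proved, stated in full; the proofs are below) =====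
def Claim_equal_suffix_from_index : Prop := ∀ (pattern : String) (index : Int) (with_digit : Bool), Dom_suffix_from_index pattern index with_digit → Spec_suffix_from_index pattern index with_digit (suffix_from_index pattern index with_digit)

-- ===== LEMMAS AND PROOFS =====

-- product of the radices of a symbol list
def pvW (l : List Char) : Int := (l.map (fun c => ((pvAlphOf c).length : Int))).prod

-- the common specification: digit i read forward with suffix-product weights
def pvChspec : List Char → Int → List Char
  | [], _ => []
  | c :: t, n =>
      (PySem.List.pyGet? (pvAlphOf c)
        (PySem.Int.mod (PySem.Int.floordiv n (pvW t)) ((pvAlphOf c).length : Int))).getD ' '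
        :: pvChspec t n

theorem pvAlph_len_pos (c : Char) : 0 < ((pvAlphOf c).length : Int) := by
  unfold pvAlphOf pvConsonants pvVowels; split <;> decide

theorem pvW_pos (l : List Char) : 0 < pvW l := by
  induction l with
  | nil => decide
  | cons c t ih =>
      simp only [pvW, List.map_cons, List.prod_cons]
      exact mul_pos (pvAlph_len_pos c) ih

-- floor-division chaining: (n // a) // b = n // (a * b) for positive a, b
theorem pv_fd_chain (n a b : Int) (ha : 0 < a) (hb : 0 < b) :
    PySem.Int.floordiv (PySem.Int.floordiv n a) b = PySem.Int.floordiv n (a * b) := by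
  rw [PySem.Int.floordiv_eq_ediv_of_pos ha, PySem.Int.floordiv_eq_ediv_of_pos hb,
      PySem.Int.floordiv_eq_ediv_of_pos (mul_pos ha hb)]
  exact Int.ediv_ediv_of_nonneg ha.le

theorem pvA_loop (l : List Char) (n : Int) (acc : List Char) :
    l.reverse.foldl
      (fun (st : Int × List Char) symbol =>
        let alphabet := if symbol == 'C' then pvConsonants else pvVowels
        let q := PySem.Int.floordiv st.1 (alphabet.length : Int)
        let r := PySem.Int.mod st.1 (alphabet.length : Int)
        (q, st.2 ++ [(PySem.List.pyGet? alphabet r).getD ' ']))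
      (n, acc)
    = (PySem.Int.floordiv n (pvW l), acc ++ (pvChspec l n).reverse) := by
  induction l generalizing acc with
  | nil =>
      simp [pvChspec, pvW]
  | cons c t ih =>
      have hW : pvW (c :: t) = pvW t * ((pvAlphOf c).length : Int) := by
        simp [pvW, mul_comm]
      simp only [List.reverse_cons, List.foldl_append, ih, List.foldl_cons, List.foldl_nil]
      refine Prod.ext ?_ ?_
      · show PySem.Int.floordiv (PySem.Int.floordiv n (pvW t)) ((pvAlphOf c).length : Int)
          = PySem.Int.floordiv n (pvW (c :: t))
        rw [pv_fd_chain n (pvW t) _ (pvW_pos t) (pvAlph_len_pos c), hW]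
      · show acc ++ (pvChspec t n).reverse ++ _ = acc ++ (pvChspec (c :: t) n).reverse
        simp only [pvChspec, List.reverse_cons, ← List.append_assoc]
        rfl

def pvWlist : List (List Char) → Int → List Int
  | [], _ => []
  | _ :: t, w => ((t.map (fun a : List Char => (a.length : Int))).prod * w) :: pvWlist t w

theorem pvB_weights (l : List (List Char)) (acc : List Int) (w : Int) :
    l.reverse.foldl
      (fun (st : List Int × Int) a => (st.1 ++ [st.2], st.2 * (a.length : Int))) (acc, w)
    = (acc ++ (pvWlist l w).reverse, (l.map (fun a : List Char => (a.length : Int))).prod * w) := by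
  induction l generalizing acc with
  | nil => simp [pvWlist]
  | cons a t ih =>
      simp only [List.reverse_cons, List.foldl_append, ih, List.foldl_cons, List.foldl_nil,
        pvWlist, List.reverse_cons, List.map_cons, List.prod_cons, List.append_assoc]
      refine Prod.ext rfl ?_
      ring

theorem pvB_chars (l : List Char) (n : Int) :
    ((l.map pvAlphOf).zip (pvWlist (l.map pvAlphOf) 1)).map
      (fun aw => (PySem.List.pyGet? aw.1
        (PySem.Int.mod (PySem.Int.floordiv n aw.2) (aw.1.length : Int))).getD ' ')
    = pvChspec l n := by
  induction l with
  | nil => simp [pvWlist, pvChspec]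
  | cons c t ih =>
      simp only [List.map_cons, pvWlist, List.zip_cons_cons, List.map_cons, ih, pvChspec,
        mul_one, List.map_map]
      rfl

-- ===== VERDICT (by name: the statement is the Claim_ definition above) =====
theorem suffix_from_index_spec : Claim_equal_suffix_from_index := by
  intro pattern index with_digit _
  unfold Spec_suffix_from_index suffix_from_index suffix_from_index_alt
  simp only [pvA_loop, pvB_weights, List.nil_append, List.reverse_reverse, pvB_chars]
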